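-- pv_equiv track=rewrite | github.com/PLSE-Lab/Python-MLAPI-expl | python_sources/crop-production-in-india.py | cat_crop
-- ===== SOURCE A (Python) =====
-- def cat_crop(cc):
--     for i in ['Rice','Maize','Wheat','Barley','Varagu','Other Cereals & Millets','Ragi','Small millets','Bajra','Jowar']:
--         if cc==i:
--             return 'Cereal'
--     for i in ['Moong','Urad','Arhar/Tur','Peas & beans','Masoor',
--               'Other Kharif pulses','other misc. pulses','Ricebean (nagadal)',
--               'Rajmash Kholar','Lentil','Samai','Blackgram','Korra','Cowpea(Lobia)',
--               'Other  Rabi pulses','Other Kharif pulses','Peas & beans (Pulses)']: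
--         if cc==i:
--             return 'Pulses'
--     for i in ['Peach','Apple','Litchi','Pear','Plums','Ber','Sapota','Lemon','Pome Granet',
--                'Other Citrus Fruit','Water Melon','Jack Fruit','Grapes','Pineapple','Orange',
--                'Pome Fruit','Citrus Fruit','Other Fresh Fruits','Mango','Papaya','Coconut','Banana']:
--         if cc==i:
--             return 'Fruits'
--     for i in ['Bean','Lab-Lab','Moth','Guar seed','Tapioca','Soyabean','Horse-gram','Gram']:
--         if cc==i:
--             return 'Beans'
--     for i in ['Turnip','Peas','Beet Root','Carrot','Yam','Ribed Guard','Ash Gourd ','Pump Kin','Redish','Snak Guard','Bottle Gourd',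
--               'Bitter Gourd','Cucumber','Drum Stick','Cauliflower','Beans & Mutter(Vegetable)','Cabbage',
--               'Bhindi','Tomato','Brinjal','Khesari','Sweet potato','Potato','Onion']:
--         if cc==i:
--             return 'Vegetables'
--     for i in ['Perilla','Colocosia','Ginger','Cardamom','Black pepper','Dry ginger','Garlic','Coriander','Turmeric','Dry chillies']:
--         if cc==i:
--             return 'Species'
--     for i in ['Jobster','Cond-spcs other']:
--         if cc==i:
--             return 'Other'
--     for i in ['other fibres','Kapas','Jute & mesta','Jute','Mesta','Cotton(lint)']:
--         if cc==i:
--             return 'fibres'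
--     for i in ['Arcanut (Processed)','Atcanut (Raw)','Cashewnut Processed','Cashewnut Raw','Cashewnut','Arecanut','Groundnut']:
--         if cc==i:
--             return 'Nuts'
--     for i in ['Rubber']:
--         if cc==i:
--             return 'Natural Polymer'
--     for i in ['Coffee']:
--         if cc== i:
--             return 'Coffee'
--     for i in ['Tea']:
--         if cc==i:
--             return 'Tea'
--     for i in ['Total foodgrain']:
--         if cc==i:
--             return 'Total foodgrain'
--     for i in ['Pulses total']:
--         if cc==i:
--             return 'Pulses total'
--     for i in ['Oilseeds total']:
--         if cc==i:
--             return 'Oilseeds total'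
--     for i in ['Paddy']:
--         if cc==i:
--             return 'Paddy'
--     for i in ['other oilseeds','Safflower','Niger seed','Castor seed','Linseed','Sunflower','Rapeseed &Mustard','Sesamum']:
--         if cc==i:
--             return 'Oilseeds'
--     for i in ['Sannhamp']:
--         if cc==i:
--             return 'Fertile Plant'
--     for i in ['Tobacco']:
--         if cc==i:
--             return 'Commercial'
--     for i in ['Sugarcane']:
--         if cc==i:
--             return 'Sugarcane'
-- ===== SOURCE B (Python) =====
-- # Same mapping as A, but as one lookup table built once (first occurrence wins)
-- # instead of 20 sequential scanning loops.
--
-- _GROUPS = [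
--     (['Rice', 'Maize', 'Wheat', 'Barley', 'Varagu', 'Other Cereals & Millets',
--       'Ragi', 'Small millets', 'Bajra', 'Jowar'], 'Cereal'),
--     (['Moong', 'Urad', 'Arhar/Tur', 'Peas & beans', 'Masoor',
--       'Other Kharif pulses', 'other misc. pulses', 'Ricebean (nagadal)',
--       'Rajmash Kholar', 'Lentil', 'Samai', 'Blackgram', 'Korra', 'Cowpea(Lobia)',
--       'Other  Rabi pulses', 'Other Kharif pulses', 'Peas & beans (Pulses)'], 'Pulses'),
--     (['Peach', 'Apple', 'Litchi', 'Pear', 'Plums', 'Ber', 'Sapota', 'Lemon', 'Pome Granet',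
--       'Other Citrus Fruit', 'Water Melon', 'Jack Fruit', 'Grapes', 'Pineapple', 'Orange',
--       'Pome Fruit', 'Citrus Fruit', 'Other Fresh Fruits', 'Mango', 'Papaya', 'Coconut', 'Banana'], 'Fruits'),
--     (['Bean', 'Lab-Lab', 'Moth', 'Guar seed', 'Tapioca', 'Soyabean', 'Horse-gram', 'Gram'], 'Beans'),
--     (['Turnip', 'Peas', 'Beet Root', 'Carrot', 'Yam', 'Ribed Guard', 'Ash Gourd ', 'Pump Kin',
--       'Redish', 'Snak Guard', 'Bottle Gourd', 'Bitter Gourd', 'Cucumber', 'Drum Stick',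
--       'Cauliflower', 'Beans & Mutter(Vegetable)', 'Cabbage', 'Bhindi', 'Tomato', 'Brinjal',
--       'Khesari', 'Sweet potato', 'Potato', 'Onion'], 'Vegetables'),
--     (['Perilla', 'Colocosia', 'Ginger', 'Cardamom', 'Black pepper', 'Dry ginger', 'Garlic',
--       'Coriander', 'Turmeric', 'Dry chillies'], 'Species'),
--     (['Jobster', 'Cond-spcs other'], 'Other'),
--     (['other fibres', 'Kapas', 'Jute & mesta', 'Jute', 'Mesta', 'Cotton(lint)'], 'fibres'),
--     (['Arcanut (Processed)', 'Atcanut (Raw)', 'Cashewnut Processed', 'Cashewnut Raw',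
--       'Cashewnut', 'Arecanut', 'Groundnut'], 'Nuts'),
--     (['Rubber'], 'Natural Polymer'),
--     (['Coffee'], 'Coffee'),
--     (['Tea'], 'Tea'),
--     (['Total foodgrain'], 'Total foodgrain'),
--     (['Pulses total'], 'Pulses total'),
--     (['Oilseeds total'], 'Oilseeds total'),
--     (['Paddy'], 'Paddy'),
--     (['other oilseeds', 'Safflower', 'Niger seed', 'Castor seed', 'Linseed', 'Sunflower',
--       'Rapeseed &Mustard', 'Sesamum'], 'Oilseeds'),
--     (['Sannhamp'], 'Fertile Plant'),
--     (['Tobacco'], 'Commercial'),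
--     (['Sugarcane'], 'Sugarcane'),
-- ]
--
-- _TABLE = {}
-- for _names, _label in _GROUPS:
--     for _n in _names:
--         _TABLE.setdefault(_n, _label)
--
--
-- def cat_crop(cc):
--     return _TABLE.get(cc)
-- ===== Notes on version B (the rewrite author's own statement) =====
-- stated objective: idiomatic
-- what changed: Replaces 20 sequential scanning loops with a single name-to-category dictionary built once (first occurrence wins via setdefault) and one table.get(cc) lookup.
import Mathlib
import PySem

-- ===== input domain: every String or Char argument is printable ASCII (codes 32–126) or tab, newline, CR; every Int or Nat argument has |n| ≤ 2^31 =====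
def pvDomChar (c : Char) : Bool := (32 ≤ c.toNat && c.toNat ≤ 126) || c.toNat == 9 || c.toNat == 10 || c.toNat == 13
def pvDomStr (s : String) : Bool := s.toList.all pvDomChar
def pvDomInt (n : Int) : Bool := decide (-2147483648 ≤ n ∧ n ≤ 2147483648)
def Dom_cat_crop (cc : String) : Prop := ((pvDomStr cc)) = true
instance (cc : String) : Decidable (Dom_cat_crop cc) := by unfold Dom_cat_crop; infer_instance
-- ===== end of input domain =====

-- B replaces A's 20 sequential membership-scan loops with one name->category table built once (first occurrence wins) and a single dict lookup; objective: idiomatic.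
-- ===== PORT A =====
-- Each Python loop "for i in L: if cc==i: return lbl" becomes the scan L.any (· == cc).
def cat_crop (cc : String) : Option String :=
  if (["Rice", "Maize", "Wheat", "Barley", "Varagu", "Other Cereals & Millets", "Ragi", "Small millets", "Bajra", "Jowar"] : List String).any (· == cc) then some "Cereal" else
  if (["Moong", "Urad", "Arhar/Tur", "Peas & beans", "Masoor", "Other Kharif pulses", "other misc. pulses", "Ricebean (nagadal)", "Rajmash Kholar", "Lentil", "Samai", "Blackgram", "Korra", "Cowpea(Lobia)", "Other  Rabi pulses", "Other Kharif pulses", "Peas & beans (Pulses)"] : List String).any (· == cc) then some "Pulses" else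
  if (["Peach", "Apple", "Litchi", "Pear", "Plums", "Ber", "Sapota", "Lemon", "Pome Granet", "Other Citrus Fruit", "Water Melon", "Jack Fruit", "Grapes", "Pineapple", "Orange", "Pome Fruit", "Citrus Fruit", "Other Fresh Fruits", "Mango", "Papaya", "Coconut", "Banana"] : List String).any (· == cc) then some "Fruits" else
  if (["Bean", "Lab-Lab", "Moth", "Guar seed", "Tapioca", "Soyabean", "Horse-gram", "Gram"] : List String).any (· == cc) then some "Beans" else
  if (["Turnip", "Peas", "Beet Root", "Carrot", "Yam", "Ribed Guard", "Ash Gourd ", "Pump Kin", "Redish", "Snak Guard", "Bottle Gourd", "Bitter Gourd", "Cucumber", "Drum Stick", "Cauliflower", "Beans & Mutter(Vegetable)", "Cabbage", "Bhindi", "Tomato", "Brinjal", "Khesari", "Sweet potato", "Potato", "Onion"] : List String).any (· == cc) then some "Vegetables" else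
  if (["Perilla", "Colocosia", "Ginger", "Cardamom", "Black pepper", "Dry ginger", "Garlic", "Coriander", "Turmeric", "Dry chillies"] : List String).any (· == cc) then some "Species" else
  if (["Jobster", "Cond-spcs other"] : List String).any (· == cc) then some "Other" else
  if (["other fibres", "Kapas", "Jute & mesta", "Jute", "Mesta", "Cotton(lint)"] : List String).any (· == cc) then some "fibres" else
  if (["Arcanut (Processed)", "Atcanut (Raw)", "Cashewnut Processed", "Cashewnut Raw", "Cashewnut", "Arecanut", "Groundnut"] : List String).any (· == cc) then some "Nuts" else
  if (["Rubber"] : List String).any (· == cc) then some "Natural Polymer" else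
  if (["Coffee"] : List String).any (· == cc) then some "Coffee" else
  if (["Tea"] : List String).any (· == cc) then some "Tea" else
  if (["Total foodgrain"] : List String).any (· == cc) then some "Total foodgrain" else
  if (["Pulses total"] : List String).any (· == cc) then some "Pulses total" else
  if (["Oilseeds total"] : List String).any (· == cc) then some "Oilseeds total" else
  if (["Paddy"] : List String).any (· == cc) then some "Paddy" else
  if (["other oilseeds", "Safflower", "Niger seed", "Castor seed", "Linseed", "Sunflower", "Rapeseed &Mustard", "Sesamum"] : List String).any (· == cc) then some "Oilseeds" else
  if (["Sannhamp"] : List String).any (· == cc) then some "Fertile Plant" else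
  if (["Tobacco"] : List String).any (· == cc) then some "Commercial" else
  if (["Sugarcane"] : List String).any (· == cc) then some "Sugarcane" else
  none

-- ===== PORT B =====
def pvGroups : List (List String × String) :=
  [(["Rice", "Maize", "Wheat", "Barley", "Varagu", "Other Cereals & Millets", "Ragi", "Small millets", "Bajra", "Jowar"], "Cereal"),
   (["Moong", "Urad", "Arhar/Tur", "Peas & beans", "Masoor", "Other Kharif pulses", "other misc. pulses", "Ricebean (nagadal)", "Rajmash Kholar", "Lentil", "Samai", "Blackgram", "Korra", "Cowpea(Lobia)", "Other  Rabi pulses", "Other Kharif pulses", "Peas & beans (Pulses)"], "Pulses"),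
   (["Peach", "Apple", "Litchi", "Pear", "Plums", "Ber", "Sapota", "Lemon", "Pome Granet", "Other Citrus Fruit", "Water Melon", "Jack Fruit", "Grapes", "Pineapple", "Orange", "Pome Fruit", "Citrus Fruit", "Other Fresh Fruits", "Mango", "Papaya", "Coconut", "Banana"], "Fruits"),
   (["Bean", "Lab-Lab", "Moth", "Guar seed", "Tapioca", "Soyabean", "Horse-gram", "Gram"], "Beans"),
   (["Turnip", "Peas", "Beet Root", "Carrot", "Yam", "Ribed Guard", "Ash Gourd ", "Pump Kin", "Redish", "Snak Guard", "Bottle Gourd", "Bitter Gourd", "Cucumber", "Drum Stick", "Cauliflower", "Beans & Mutter(Vegetable)", "Cabbage", "Bhindi", "Tomato", "Brinjal", "Khesari", "Sweet potato", "Potato", "Onion"], "Vegetables"),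
   (["Perilla", "Colocosia", "Ginger", "Cardamom", "Black pepper", "Dry ginger", "Garlic", "Coriander", "Turmeric", "Dry chillies"], "Species"),
   (["Jobster", "Cond-spcs other"], "Other"),
   (["other fibres", "Kapas", "Jute & mesta", "Jute", "Mesta", "Cotton(lint)"], "fibres"),
   (["Arcanut (Processed)", "Atcanut (Raw)", "Cashewnut Processed", "Cashewnut Raw", "Cashewnut", "Arecanut", "Groundnut"], "Nuts"),
   (["Rubber"], "Natural Polymer"),
   (["Coffee"], "Coffee"),
   (["Tea"], "Tea"),
   (["Total foodgrain"], "Total foodgrain"),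
   (["Pulses total"], "Pulses total"),
   (["Oilseeds total"], "Oilseeds total"),
   (["Paddy"], "Paddy"),
   (["other oilseeds", "Safflower", "Niger seed", "Castor seed", "Linseed", "Sunflower", "Rapeseed &Mustard", "Sesamum"], "Oilseeds"),
   (["Sannhamp"], "Fertile Plant"),
   (["Tobacco"], "Commercial"),
   (["Sugarcane"], "Sugarcane")]

-- _TABLE = {}; for names, label in _GROUPS: for n in names: _TABLE.setdefault(n, label)
def pvTable : PySem.Dict String String :=
  pvGroups.foldl (fun d g => g.1.foldl (fun d n => PySem.Dict.setdefault d n g.2) d) PySem.Dict.empty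

-- return _TABLE.get(cc)
def cat_crop_alt (cc : String) : Option String :=
  PySem.Dict.get? pvTable cc

-- ===== PRECONDITION & SPEC =====
def Spec_cat_crop (cc : String) (out : Option String) : Prop := out = cat_crop_alt cc
instance (cc : String) (out : Option String) : Decidable (Spec_cat_crop cc out) := by unfold Spec_cat_crop; infer_instance

-- ===== CLAIM (what is proved, stated in full; the proofs are below) =====
def Claim_equal_cat_crop : Prop := ∀ (cc : String), Dom_cat_crop cc → Spec_cat_crop cc (cat_crop cc)

-- ===== LEMMAS AND PROOFS =====
def pvAllNames : List String := pvGroups.flatMap (·.1)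

def pvTableItems : List (String × String) :=
  [("Rice", "Cereal"),
   ("Maize", "Cereal"),
   ("Wheat", "Cereal"),
   ("Barley", "Cereal"),
   ("Varagu", "Cereal"),
   ("Other Cereals & Millets", "Cereal"),
   ("Ragi", "Cereal"),
   ("Small millets", "Cereal"),
   ("Bajra", "Cereal"),
   ("Jowar", "Cereal"),
   ("Moong", "Pulses"),
   ("Urad", "Pulses"),
   ("Arhar/Tur", "Pulses"),
   ("Peas & beans", "Pulses"),
   ("Masoor", "Pulses"),
   ("Other Kharif pulses", "Pulses"),
   ("other misc. pulses", "Pulses"),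
   ("Ricebean (nagadal)", "Pulses"),
   ("Rajmash Kholar", "Pulses"),
   ("Lentil", "Pulses"),
   ("Samai", "Pulses"),
   ("Blackgram", "Pulses"),
   ("Korra", "Pulses"),
   ("Cowpea(Lobia)", "Pulses"),
   ("Other  Rabi pulses", "Pulses"),
   ("Peas & beans (Pulses)", "Pulses"),
   ("Peach", "Fruits"),
   ("Apple", "Fruits"),
   ("Litchi", "Fruits"),
   ("Pear", "Fruits"),
   ("Plums", "Fruits"),
   ("Ber", "Fruits"),
   ("Sapota", "Fruits"),
   ("Lemon", "Fruits"),
   ("Pome Granet", "Fruits"),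
   ("Other Citrus Fruit", "Fruits"),
   ("Water Melon", "Fruits"),
   ("Jack Fruit", "Fruits"),
   ("Grapes", "Fruits"),
   ("Pineapple", "Fruits"),
   ("Orange", "Fruits"),
   ("Pome Fruit", "Fruits"),
   ("Citrus Fruit", "Fruits"),
   ("Other Fresh Fruits", "Fruits"),
   ("Mango", "Fruits"),
   ("Papaya", "Fruits"),
   ("Coconut", "Fruits"),
   ("Banana", "Fruits"),
   ("Bean", "Beans"),
   ("Lab-Lab", "Beans"),
   ("Moth", "Beans"),
   ("Guar seed", "Beans"),
   ("Tapioca", "Beans"),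
   ("Soyabean", "Beans"),
   ("Horse-gram", "Beans"),
   ("Gram", "Beans"),
   ("Turnip", "Vegetables"),
   ("Peas", "Vegetables"),
   ("Beet Root", "Vegetables"),
   ("Carrot", "Vegetables"),
   ("Yam", "Vegetables"),
   ("Ribed Guard", "Vegetables"),
   ("Ash Gourd ", "Vegetables"),
   ("Pump Kin", "Vegetables"),
   ("Redish", "Vegetables"),
   ("Snak Guard", "Vegetables"),
   ("Bottle Gourd", "Vegetables"),
   ("Bitter Gourd", "Vegetables"),
   ("Cucumber", "Vegetables"),
   ("Drum Stick", "Vegetables"),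
   ("Cauliflower", "Vegetables"),
   ("Beans & Mutter(Vegetable)", "Vegetables"),
   ("Cabbage", "Vegetables"),
   ("Bhindi", "Vegetables"),
   ("Tomato", "Vegetables"),
   ("Brinjal", "Vegetables"),
   ("Khesari", "Vegetables"),
   ("Sweet potato", "Vegetables"),
   ("Potato", "Vegetables"),
   ("Onion", "Vegetables"),
   ("Perilla", "Species"),
   ("Colocosia", "Species"),
   ("Ginger", "Species"),
   ("Cardamom", "Species"),
   ("Black pepper", "Species"),
   ("Dry ginger", "Species"),
   ("Garlic", "Species"),
   ("Coriander", "Species"),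
   ("Turmeric", "Species"),
   ("Dry chillies", "Species"),
   ("Jobster", "Other"),
   ("Cond-spcs other", "Other"),
   ("other fibres", "fibres"),
   ("Kapas", "fibres"),
   ("Jute & mesta", "fibres"),
   ("Jute", "fibres"),
   ("Mesta", "fibres"),
   ("Cotton(lint)", "fibres"),
   ("Arcanut (Processed)", "Nuts"),
   ("Atcanut (Raw)", "Nuts"),
   ("Cashewnut Processed", "Nuts"),
   ("Cashewnut Raw", "Nuts"),
   ("Cashewnut", "Nuts"),
   ("Arecanut", "Nuts"),
   ("Groundnut", "Nuts"),
   ("Rubber", "Natural Polymer"),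
   ("Coffee", "Coffee"),
   ("Tea", "Tea"),
   ("Total foodgrain", "Total foodgrain"),
   ("Pulses total", "Pulses total"),
   ("Oilseeds total", "Oilseeds total"),
   ("Paddy", "Paddy"),
   ("other oilseeds", "Oilseeds"),
   ("Safflower", "Oilseeds"),
   ("Niger seed", "Oilseeds"),
   ("Castor seed", "Oilseeds"),
   ("Linseed", "Oilseeds"),
   ("Sunflower", "Oilseeds"),
   ("Rapeseed &Mustard", "Oilseeds"),
   ("Sesamum", "Oilseeds"),
   ("Sannhamp", "Fertile Plant"),
   ("Tobacco", "Commercial"),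
   ("Sugarcane", "Sugarcane")]


set_option maxRecDepth 40000 in
theorem pvTable_lit : pvTable = PySem.Dict.mk pvTableItems := by decide

theorem alt_eq (cc : String) : cat_crop_alt cc =
    PySem.Dict.get? (PySem.Dict.mk pvTableItems) cc := by
  unfold cat_crop_alt
  rw [pvTable_lit]

theorem any_false (cc : String) (h : cc ∉ pvAllNames) (l : List String)
    (sub : l ⊆ pvAllNames) : l.any (· == cc) = false := by
  simp only [List.any_eq_false, beq_iff_eq]
  intro x hx e
  exact h (e ▸ sub hx)

set_option maxRecDepth 40000 in
theorem not_mem_case (cc : String) (h : cc ∉ pvAllNames) :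
    cat_crop cc = cat_crop_alt cc := by
  rw [alt_eq]
  have hnone : PySem.Dict.get? (PySem.Dict.mk pvTableItems) cc = none := by
    rw [PySem.Dict.get?_eq_none_iff_not_mem_keys]
    intro hk
    exact h ((by decide : PySem.Dict.keys (PySem.Dict.mk pvTableItems) ⊆ pvAllNames) hk)
  rw [hnone]
  unfold cat_crop
  rw [any_false cc h _ (by decide)]
  rw [any_false cc h _ (by decide)]
  rw [any_false cc h _ (by decide)]
  rw [any_false cc h _ (by decide)]
  rw [any_false cc h _ (by decide)]
  rw [any_false cc h _ (by decide)]
  rw [any_false cc h _ (by decide)]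
  rw [any_false cc h _ (by decide)]
  rw [any_false cc h _ (by decide)]
  rw [any_false cc h _ (by decide)]
  rw [any_false cc h _ (by decide)]
  rw [any_false cc h _ (by decide)]
  rw [any_false cc h _ (by decide)]
  rw [any_false cc h _ (by decide)]
  rw [any_false cc h _ (by decide)]
  rw [any_false cc h _ (by decide)]
  rw [any_false cc h _ (by decide)]
  rw [any_false cc h _ (by decide)]
  rw [any_false cc h _ (by decide)]
  rw [any_false cc h _ (by decide)]
  simp

-- ===== VERDICT (by name: the statement is the Claim_ definition above) =====
theorem cat_crop_spec : Claim_equal_cat_crop := by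
  intro cc _
  unfold Spec_cat_crop
  by_cases h : cc ∈ pvAllNames
  · rw [alt_eq]
    fin_cases h <;> rfl
  · exact not_mem_case cc h
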